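-- pv_equiv track=rewrite | github.com/Bucci23/progettoCVCS | resnet_on_grocery/load_groceries.py | map_to_numeric
-- ===== SOURCE A (Python) =====
-- def map_to_numeric(list_of_directories):
--     #I want to map the names of the directories to a numeric value:
--     #I create a dictionary:
--     dict_of_directories = {}
--     for i in range(len(list_of_directories)):
--         if list_of_directories[i] not in dict_of_directories:
--             dict_of_directories[list_of_directories[i]] = len(dict_of_directories)
--         else:
--             continue
--     return dict_of_directories
-- ===== SOURCE B (Python) =====
-- def map_to_numeric(list_of_directories):
--     # Stateless formulation: an entry is kept iff it is a first occurrence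
--     # (not present earlier in the list), and its numeric value is the number
--     # of distinct names in the prefix before it -- recomputed from the list
--     # itself, with no incrementally grown mapping.
--     lst = list_of_directories
--     return {x: len(set(lst[:i])) for i, x in enumerate(lst) if x not in lst[:i]}
-- ===== Notes on version B (the rewrite author's own statement) =====
-- stated objective: alternative
-- what changed: A's stateful single pass (grow a dict, index = current dict size) is replaced by a stateless prefix-scan comprehension: keep each element iff it does not occur earlier in the list, and compute its index as the count of distinct names in the prefix, recomputed from the original list with no accumulated mapping.
import Mathlib
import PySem

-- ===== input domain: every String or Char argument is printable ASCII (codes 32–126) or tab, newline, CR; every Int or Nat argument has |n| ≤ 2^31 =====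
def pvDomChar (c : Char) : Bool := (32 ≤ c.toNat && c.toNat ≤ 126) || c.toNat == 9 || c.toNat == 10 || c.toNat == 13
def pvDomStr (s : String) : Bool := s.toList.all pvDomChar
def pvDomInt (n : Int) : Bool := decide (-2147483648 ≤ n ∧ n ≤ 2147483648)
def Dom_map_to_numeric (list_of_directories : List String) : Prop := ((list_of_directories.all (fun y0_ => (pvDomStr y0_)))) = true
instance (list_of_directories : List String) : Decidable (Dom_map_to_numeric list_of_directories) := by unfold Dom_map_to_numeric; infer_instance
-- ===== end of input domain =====

-- B replaces A's stateful pass (grow a dict, index = its current size) by a stateless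
-- prefix-scan: keep an element iff it is a first occurrence and index it by the count of
-- distinct names in the prefix of the original list (alternative decomposition, not faster).

-- ===== PORT A =====
def map_to_numeric (list_of_directories : List String) : List (String × Int) :=
  let dict_of_directories : PySem.Dict String Int :=
    (PySem.List.pyRange 0 (PySem.List.len list_of_directories) 1).foldl
      (fun d i =>
        if PySem.Dict.contains d (PySem.List.pyGetD list_of_directories i "") = false then
          PySem.Dict.insert d (PySem.List.pyGetD list_of_directories i "") (PySem.Dict.size d)
        else d)
      PySem.Dict.empty
  dict_of_directories.items

-- ===== PORT B =====
-- The dict comprehension's keys are pairwise distinct by construction (each kept name is a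
-- first occurrence), so its items in insertion order port to this filterMap over enumerate.
def map_to_numeric_alt (list_of_directories : List String) : List (String × Int) :=
  (PySem.List.enumerate list_of_directories 0).filterMap (fun p =>
    if p.2 ∈ list_of_directories.take p.1.toNat then none
    else some (p.2, ((PySem.Set.ofList (list_of_directories.take p.1.toNat)).length : Int)))

-- ===== PRECONDITION & SPEC =====
def Spec_map_to_numeric (list_of_directories : List String) (out : List (String × Int)) : Prop := out = map_to_numeric_alt list_of_directories
instance (list_of_directories : List String) (out : List (String × Int)) : Decidable (Spec_map_to_numeric list_of_directories out) := by unfold Spec_map_to_numeric; infer_instance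

-- ===== CLAIM (what is proved, stated in full; the proofs are below) =====
def Claim_equal_map_to_numeric : Prop := ∀ (list_of_directories : List String), Dom_map_to_numeric list_of_directories → Spec_map_to_numeric list_of_directories (map_to_numeric list_of_directories)

-- ===== LEMMAS AND PROOFS =====

-- A-side loop invariant: a fold of A's step over xs, started from a dict whose items enumerate a
-- nodup key list s, yields the enumeration of s updated (set-style) by xs
theorem map_to_numeric_inv (xs : List String) :
    ∀ (s : List String) (d : PySem.Dict String Int),
      s.Nodup →
      d.items = (PySem.List.enumerate s 0).map (fun p => (p.2, p.1)) →
      (xs.foldl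
        (fun d v =>
          if PySem.Dict.contains d v = false then
            PySem.Dict.insert d v ((PySem.Dict.size d : Int))
          else d) d).items
        = (PySem.List.enumerate (PySem.Set.update s xs) 0).map (fun p => (p.2, p.1)) := by
  induction xs with
  | nil => intro s d hnd hitems; simpa [PySem.Set.update] using hitems
  | cons x xs ih =>
    intro s d hnd hitems
    have hkeys : d.keys = s := by
      simp [PySem.Dict.keys, hitems, List.map_map]
      exact PySem.List.map_snd_enumerate s 0
    have hcont : PySem.Dict.contains d x = decide (x ∈ s) := by
      rw [PySem.Dict.contains_eq_decide_mem_keys, hkeys]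
    by_cases hx : x ∈ s
    · have : PySem.Dict.contains d x = true := by simp [hcont, hx]
      have hadd : PySem.Set.add s x = s := by simp [PySem.Set.add, PySem.Set.contains, hx]
      simp only [List.foldl_cons, this]
      simp only [PySem.Set.update, List.foldl_cons] at *
      rw [hadd] at *
      exact ih s d hnd hitems
    · have hcf : PySem.Dict.contains d x = false := by simp [hcont, hx]
      have hsize : ((PySem.Dict.size d : Int)) = (s.length : Int) := by
        simp [PySem.Dict.size, hitems, PySem.List.length_enumerate]
      have hitems' : (PySem.Dict.insert d x (PySem.Dict.size d)).items
          = (PySem.List.enumerate (s ++ [x]) 0).map (fun p => (p.2, p.1)) := by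
        rw [PySem.Dict.items_insert, hcf, if_neg (by simp), hitems, hsize,
            PySem.List.enumerate_append]
        simp [PySem.List.enumerate]
      have hadd : PySem.Set.add s x = s ++ [x] := by
        simp [PySem.Set.add, PySem.Set.contains, hx]
      have hnd' : (s ++ [x]).Nodup := by
        rw [List.nodup_append]
        refine ⟨hnd, List.nodup_singleton x, ?_⟩
        intro a ha b hb heq
        rw [List.mem_singleton] at hb
        subst hb; subst heq
        exact hx ha
      simp only [List.foldl_cons, hcf]
      simp only [PySem.Set.update, List.foldl_cons]
      rw [hadd]
      exact ih (s ++ [x]) _ hnd' hitems'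

-- B-side: the prefix-scan filterMap over a suffix ys behind a concrete prefix q equals the
-- tail (past the already-seen distinct names) of the enumeration of the updated distinct list
theorem map_to_numeric_alt_inv (ys : List String) :
    ∀ (q : List String),
      (PySem.List.enumerate ys (q.length : Int)).filterMap (fun p =>
        if p.2 ∈ (q ++ ys).take p.1.toNat then none
        else some (p.2, ((PySem.Set.ofList ((q ++ ys).take p.1.toNat)).length : Int)))
      = (((PySem.List.enumerate (PySem.Set.update (PySem.Set.ofList q) ys) 0).map
            (fun p => (p.2, p.1))).drop (PySem.Set.ofList q).length) := by
  induction ys with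
  | nil =>
    intro q
    simp [PySem.List.enumerate, PySem.Set.update, List.drop_eq_nil_of_le]
  | cons y ys ih =>
    intro q
    rw [PySem.List.enumerate_cons, List.filterMap_cons]
    have htake : (q ++ y :: ys).take ((q.length : Int)).toNat = q := by
      simp [List.take_left']
    have hassoc : q ++ y :: ys = (q ++ [y]) ++ ys := by simp
    have hlen1 : ((q.length : Int) + 1) = (((q ++ [y]).length : Int)) := by simp
    have hIH := ih (q ++ [y])
    rw [← hlen1, ← hassoc] at hIH
    have hupd : PySem.Set.update (PySem.Set.ofList q) (y :: ys)
        = PySem.Set.update (PySem.Set.ofList (q ++ [y])) ys := by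
      rw [PySem.Set.update_cons, PySem.Set.ofList_append_singleton]
    by_cases hy : y ∈ q
    · simp only [htake, hy, if_true]
      rw [hIH, hupd]
      have : PySem.Set.ofList (q ++ [y]) = PySem.Set.ofList q := by
        rw [PySem.Set.ofList_append_singleton, PySem.Set.add_of_mem]
        simpa [PySem.Set.mem_ofList] using hy
      rw [this]
    · simp only [htake, hy, if_false]
      rw [hIH, hupd]
      have hof : PySem.Set.ofList (q ++ [y]) = PySem.Set.ofList q ++ [y] := by
        rw [PySem.Set.ofList_append_singleton, PySem.Set.add_of_not_mem]
        simpa [PySem.Set.mem_ofList] using hy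
      obtain ⟨new, hnew⟩ : ∃ new, PySem.Set.update (PySem.Set.ofList (q ++ [y])) ys
          = PySem.Set.ofList (q ++ [y]) ++ new :=
        ⟨_, PySem.Set.update_eq_append_filter _ _⟩
      rw [hnew, hof]
      set s := PySem.Set.ofList q with hs
      rw [List.append_assoc, PySem.List.enumerate_append, List.map_append]
      set L2 := (PySem.List.enumerate ([y] ++ new) ((0:Int) + s.length)).map
        (fun p : Int × String => (p.2, p.1)) with hL2
      have hmaplen : ((PySem.List.enumerate s 0).map
          (fun p : Int × String => (p.2, p.1))).length = s.length := by
        simp [PySem.List.length_enumerate]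
      rw [List.drop_left' hmaplen]
      have hL2' : L2 = (y, (s.length : Int)) ::
          (PySem.List.enumerate new ((s.length : Int) + 1)).map
            (fun p : Int × String => (p.2, p.1)) := by
        rw [hL2, PySem.List.enumerate_append]
        simp [PySem.List.enumerate]
      rw [hL2']
      congr 1
      rw [show (PySem.List.enumerate s 0).map (fun p : Int × String => (p.2, p.1))
            ++ (y, (s.length : Int)) ::
               (PySem.List.enumerate new ((s.length : Int) + 1)).map
                 (fun p : Int × String => (p.2, p.1))
          = ((PySem.List.enumerate s 0).map (fun p : Int × String => (p.2, p.1))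
              ++ [(y, (s.length : Int))])
            ++ (PySem.List.enumerate new ((s.length : Int) + 1)).map
                 (fun p : Int × String => (p.2, p.1)) from by simp]
      rw [show (s ++ [y]).length
          = (((PySem.List.enumerate s 0).map (fun p : Int × String => (p.2, p.1))
              ++ [(y, (s.length : Int))])).length from by
            simp [PySem.List.length_enumerate]]
      rw [List.drop_left]

-- ===== VERDICT (by name: the statement is the Claim_ definition above) =====
theorem map_to_numeric_spec : Claim_equal_map_to_numeric := by
  intro xs _
  unfold Spec_map_to_numeric map_to_numeric map_to_numeric_alt
  rw [PySem.List.foldl_pyRange_zero_pyGetD xs ""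
        (fun d v =>
          if PySem.Dict.contains d v = false then
            PySem.Dict.insert d v ((PySem.Dict.size d : Int))
          else d) PySem.Dict.empty]
  rw [map_to_numeric_inv xs [] PySem.Dict.empty (by simp)
        (by simp [PySem.List.enumerate, PySem.Dict.empty])]
  have h := map_to_numeric_alt_inv xs []
  simp only [List.nil_append, List.length_nil, Int.natCast_zero] at h
  rw [h]
  simp [PySem.Set.update_nil_left]
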